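-- pv_equiv track=rewrite | github.com/rodrigolsouza/Softex | AED/AED_atividade06/TAD_Complexos.py | tratadorComplexos
-- ===== SOURCE A (Python) =====
-- def tratadorComplexos(num):
--     real=""
--     imaginario=""
--     for x in num:
--         if x=="+" or x=="-":
--             if real=="":
--                 real+=str(x)
--             else:
--                 imaginario+=str(x)
--         elif x!="+" and x!="-":
--             if imaginario=="":
--                 real+=str(x)
--             else:
--                 imaginario+=str(x)
--     imaginario=imaginario[:-1]
--     return(real,imaginario)
-- ===== SOURCE B (Python) =====
-- def tratadorComplexos(num):
--     # Scan for the first separating sign (a '+'/'-' not in leading position),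
--     # then slice: real = prefix, imaginary = rest with its last char dropped.
--     for i in range(1, len(num)):
--         if num[i] == "+" or num[i] == "-":
--             return (num[:i], num[i:-1])
--     return (num, "")
-- ===== Notes on version B (the rewrite author's own statement) =====
-- stated objective: simpler
-- what changed: Replaces the char-by-char two-buffer accumulation with a single scan for the first non-leading sign followed by two slices.
import Mathlib
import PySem

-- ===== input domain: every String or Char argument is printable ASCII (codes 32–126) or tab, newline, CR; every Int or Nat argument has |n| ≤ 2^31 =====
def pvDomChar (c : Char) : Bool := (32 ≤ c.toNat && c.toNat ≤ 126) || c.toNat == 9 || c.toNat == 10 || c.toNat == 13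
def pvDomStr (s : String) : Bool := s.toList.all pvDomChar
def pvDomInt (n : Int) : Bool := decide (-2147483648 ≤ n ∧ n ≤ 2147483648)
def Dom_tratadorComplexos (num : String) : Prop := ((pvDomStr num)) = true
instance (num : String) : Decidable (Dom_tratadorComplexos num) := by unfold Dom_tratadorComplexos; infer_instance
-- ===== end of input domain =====

-- B replaces A's char-by-char two-buffer accumulation with a scan for the first
-- non-leading sign plus two slices (objective: simpler).

-- ===== PORT A =====
-- the two string buffers are kept as List Char and materialised with String.ofList at
-- the end; += of one char is list append, imaginario[:-1] is dropLast (exact for s[:-1])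
def tcStep (st : List Char × List Char) (x : Char) : List Char × List Char :=
  if x = '+' ∨ x = '-' then
    if st.1 = [] then (st.1 ++ [x], st.2) else (st.1, st.2 ++ [x])
  else
    if st.2 = [] then (st.1 ++ [x], st.2) else (st.1, st.2 ++ [x])

def tratadorComplexos (num : String) : String × String :=
  let st := num.toList.foldl tcStep ([], [])
  (String.ofList st.1, String.ofList st.2.dropLast)

-- ===== PORT B =====
-- index of the first '+'/'-' in the scanned suffix (B's range(1, len) loop,
-- offsets relative to position 1)
def tcSignIdx : List Char → Option Nat
  | [] => none
  | c :: cs => if c = '+' ∨ c = '-' then some 0 else (tcSignIdx cs).map (· + 1)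

def tratadorComplexos_alt (num : String) : String × String :=
  match num.toList with
  | [] => (num, "")
  | _ :: rest =>
    match tcSignIdx rest with
    | none => (num, "")
    | some j =>
      let i := j + 1
      -- num[:i] and num[i:-1]
      (String.ofList (num.toList.take i), String.ofList ((num.toList.drop i).dropLast))

-- ===== PRECONDITION & SPEC =====
def Spec_tratadorComplexos (num : String) (out : String × String) : Prop := out = tratadorComplexos_alt num
instance (num : String) (out : String × String) : Decidable (Spec_tratadorComplexos num out) := by unfold Spec_tratadorComplexos; infer_instance

-- ===== CLAIM (what is proved, stated in full; the proofs are below) =====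
def Claim_equal_tratadorComplexos : Prop := ∀ (num : String), Dom_tratadorComplexos num → Spec_tratadorComplexos num (tratadorComplexos num)

-- ===== LEMMAS AND PROOFS =====

-- once both buffers are nonempty every remaining char is appended to imaginario
theorem tcStep_dump (cs : List Char) : ∀ r i, r ≠ [] → i ≠ [] →
    cs.foldl tcStep (r, i) = (r, i ++ cs) := by
  induction cs with
  | nil => intro r i _ _; simp
  | cons c cs ih =>
    intro r i hr hi
    simp only [List.foldl_cons]
    have hstep : tcStep (r, i) c = (r, i ++ [c]) := by
      simp [tcStep, hr, hi]
    rw [hstep, ih r (i ++ [c]) hr (by simp)]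
    simp

-- while imaginario is empty and real is nonempty, the fold splits at the first sign
theorem tcFold_scan (cs : List Char) : ∀ r : List Char, r ≠ [] →
    cs.foldl tcStep (r, []) =
      (match tcSignIdx cs with
       | none => (r ++ cs, [])
       | some j => (r ++ cs.take j, cs.drop j)) := by
  induction cs with
  | nil => intro r _; simp [tcSignIdx]
  | cons c cs ih =>
    intro r hr
    by_cases hc : c = '+' ∨ c = '-'
    · have hstep : tcStep (r, []) c = (r, [c]) := by
        simp [tcStep, hc, hr]
      simp only [List.foldl_cons, hstep, tcSignIdx, if_pos hc]
      rw [tcStep_dump cs r [c] hr (by simp)]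
      simp
    · have hstep : tcStep (r, []) c = (r ++ [c], []) := by
        simp [tcStep, hc]
      simp only [List.foldl_cons, hstep, tcSignIdx, if_neg hc]
      rw [ih (r ++ [c]) (by simp)]
      cases h : tcSignIdx cs with
      | none => simp
      | some j => simp

-- the first character always goes to real
theorem tcStep_first (c : Char) : tcStep ([], []) c = ([c], []) := by
  by_cases hc : c = '+' ∨ c = '-' <;> simp [tcStep, hc]

-- ===== VERDICT (by name: the statement is the Claim_ definition above) =====
theorem tratadorComplexos_spec : Claim_equal_tratadorComplexos := by
  intro num _
  unfold Spec_tratadorComplexos tratadorComplexos tratadorComplexos_alt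
  cases h : num.toList with
  | nil =>
    have h2 : num = "" := by rw [← @String.ofList_toList num, h]
    simp [h2]
  | cons c rest =>
    simp only [List.foldl_cons, tcStep_first]
    rw [tcFold_scan rest [c] (by simp)]
    cases hs : tcSignIdx rest with
    | none =>
      simp only [List.singleton_append, List.dropLast_nil]
      rw [← h, String.ofList_toList]
    | some j =>
      simp [List.take_succ_cons, List.drop_succ_cons]
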